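-- pv_equiv track=rewrite | github.com/zach-abraham/sentinel-mcp | src/sentinel_mcp/server.py | _identify_phases
-- ===== SOURCE A (Python) =====
-- def _identify_phases(event_types: list[str]) -> list[str]:
--     """Map event types to kill chain phases."""
--     phases = []
--     phase_map = {
--         "Reconnaissance": {"invalid_user", "disconnect"},
--         "Initial Access": {"failed_login", "successful_login"},
--         "Execution": {"suspicious_process", "cron_exec"},
--         "Persistence": {"user_add", "user_modify", "cron_modified", "iam_modification"},
--         "Privilege Escalation": {"sudo", "su"},
--         "Defense Evasion": {"service_stop", "defense_evasion"},
--         "Discovery": set(),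
--         "Exfiltration": {"data_modification", "data_access"},
--     }
--
--     seen = set()
--     type_set = set(event_types)
--     for phase, triggers in phase_map.items():
--         if triggers & type_set and phase not in seen:
--             phases.append(phase)
--             seen.add(phase)
--
--     return phases
-- ===== SOURCE B (Python) =====
-- _INVERTED = {
--     "invalid_user": "Reconnaissance",
--     "disconnect": "Reconnaissance",
--     "failed_login": "Initial Access",
--     "successful_login": "Initial Access",
--     "suspicious_process": "Execution",
--     "cron_exec": "Execution",
--     "user_add": "Persistence",
--     "user_modify": "Persistence",
--     "cron_modified": "Persistence",
--     "iam_modification": "Persistence",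
--     "sudo": "Privilege Escalation",
--     "su": "Privilege Escalation",
--     "service_stop": "Defense Evasion",
--     "defense_evasion": "Defense Evasion",
--     "data_modification": "Exfiltration",
--     "data_access": "Exfiltration",
-- }
--
-- _ORDER = [
--     "Reconnaissance",
--     "Initial Access",
--     "Execution",
--     "Persistence",
--     "Privilege Escalation",
--     "Defense Evasion",
--     "Discovery",
--     "Exfiltration",
-- ]
--
--
-- def _identify_phases(event_types: list[str]) -> list[str]:
--     """Map event types to kill chain phases."""
--     found = {_INVERTED[e] for e in event_types if e in _INVERTED}
--     return [p for p in _ORDER if p in found]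
-- ===== Notes on version B (the rewrite author's own statement) =====
-- stated objective: idiomatic
-- what changed: Replaces the per-phase set-intersection loop (with a redundant 'seen' set) by a precomputed inverted trigger-to-phase dict: one set comprehension over the events collects the hit phases, then a fixed ordered phase list is filtered, preserving the original emit order.
import Mathlib
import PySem

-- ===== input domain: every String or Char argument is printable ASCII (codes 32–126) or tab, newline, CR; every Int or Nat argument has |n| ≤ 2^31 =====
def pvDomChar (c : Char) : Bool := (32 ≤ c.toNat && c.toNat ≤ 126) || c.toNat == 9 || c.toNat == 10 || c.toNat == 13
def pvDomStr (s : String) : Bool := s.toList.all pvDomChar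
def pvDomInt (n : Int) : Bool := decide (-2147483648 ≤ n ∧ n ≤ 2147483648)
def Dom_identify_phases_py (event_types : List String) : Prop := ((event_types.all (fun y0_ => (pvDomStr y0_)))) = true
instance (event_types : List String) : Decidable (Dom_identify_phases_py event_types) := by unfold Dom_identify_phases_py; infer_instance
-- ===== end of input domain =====

-- B replaces A's per-phase set-intersection loop by an inverted trigger→phase dict, a set
-- comprehension over the events, and an ordered emit over the fixed phase list (idiomatic).

-- ===== PORT A =====
def phaseMapA : List (String × PySem.Set String) :=
  [("Reconnaissance", PySem.Set.ofList ["invalid_user", "disconnect"]),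
   ("Initial Access", PySem.Set.ofList ["failed_login", "successful_login"]),
   ("Execution", PySem.Set.ofList ["suspicious_process", "cron_exec"]),
   ("Persistence", PySem.Set.ofList ["user_add", "user_modify", "cron_modified", "iam_modification"]),
   ("Privilege Escalation", PySem.Set.ofList ["sudo", "su"]),
   ("Defense Evasion", PySem.Set.ofList ["service_stop", "defense_evasion"]),
   ("Discovery", PySem.Set.empty),
   ("Exfiltration", PySem.Set.ofList ["data_modification", "data_access"])]

-- loop body of A: 'if triggers & type_set and phase not in seen: phases.append(phase); seen.add(phase)'
def stepA (type_set : PySem.Set String) (st : List String × PySem.Set String)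
    (pt : String × PySem.Set String) : List String × PySem.Set String :=
  if !(PySem.Set.inter pt.2 type_set).isEmpty && !(PySem.Set.contains st.2 pt.1) then
    (st.1 ++ [pt.1], PySem.Set.add st.2 pt.1)
  else st

def identify_phases_py (event_types : List String) : List String :=
  let type_set : PySem.Set String := PySem.Set.ofList event_types
  (phaseMapA.foldl (stepA type_set) ([], PySem.Set.empty)).1

-- ===== PORT B =====
def invertedB : PySem.Dict String String := PySem.Dict.ofList
  [("invalid_user", "Reconnaissance"), ("disconnect", "Reconnaissance"),
   ("failed_login", "Initial Access"), ("successful_login", "Initial Access"),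
   ("suspicious_process", "Execution"), ("cron_exec", "Execution"),
   ("user_add", "Persistence"), ("user_modify", "Persistence"),
   ("cron_modified", "Persistence"), ("iam_modification", "Persistence"),
   ("sudo", "Privilege Escalation"), ("su", "Privilege Escalation"),
   ("service_stop", "Defense Evasion"), ("defense_evasion", "Defense Evasion"),
   ("data_modification", "Exfiltration"), ("data_access", "Exfiltration")]

def orderB : List String :=
  ["Reconnaissance", "Initial Access", "Execution", "Persistence",
   "Privilege Escalation", "Defense Evasion", "Discovery", "Exfiltration"]

def identify_phases_py_alt (event_types : List String) : List String :=
  let found : PySem.Set String :=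
    PySem.Set.ofList (event_types.filterMap (fun e => invertedB.get? e))
  orderB.filter (fun p => PySem.Set.contains found p)

-- ===== PRECONDITION & SPEC =====
def Spec_identify_phases_py (event_types : List String) (out : List String) : Prop := out = identify_phases_py_alt event_types
instance (event_types : List String) (out : List String) : Decidable (Spec_identify_phases_py event_types out) := by unfold Spec_identify_phases_py; infer_instance

-- ===== CLAIM (what is proved, stated in full; the proofs are below) =====
def Claim_equal_identify_phases_py : Prop := ∀ (event_types : List String), Dom_identify_phases_py event_types → Spec_identify_phases_py event_types (identify_phases_py event_types)

-- ===== LEMMAS AND PROOFS =====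

-- A's fold appends exactly the phases whose trigger set meets type_set (the 'seen' check never fires).
lemma foldA_eq (ts : PySem.Set String) :
    ∀ (pm : List (String × PySem.Set String)) (acc : List String) (seen : PySem.Set String),
      (pm.map Prod.fst).Nodup → (∀ pt ∈ pm, pt.1 ∉ seen) →
      (pm.foldl (stepA ts) (acc, seen)).1 =
        acc ++ (pm.filter (fun pt => !(PySem.Set.inter pt.2 ts).isEmpty)).map Prod.fst := by
  intro pm
  induction pm with
  | nil => intro acc seen _ _; simp
  | cons pt rest ih =>
    intro acc seen hnd hseen
    have hpt : pt.1 ∉ seen := hseen pt (List.mem_cons_self ..)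
    have hc : PySem.Set.contains seen pt.1 = false := by
      by_contra h
      exact hpt ((PySem.Set.contains_iff seen pt.1).mp (Bool.not_eq_false _ ▸ h))
    simp only [List.map_cons, List.nodup_cons] at hnd
    by_cases hint : (!(PySem.Set.inter pt.2 ts).isEmpty) = true
    · have hrest : ∀ q ∈ rest, q.1 ∉ PySem.Set.add seen pt.1 := by
        intro q hq hmem
        rcases (PySem.Set.mem_add seen pt.1 q.1).mp hmem with h | h
        · exact hseen q (List.mem_cons_of_mem _ hq) h
        · exact hnd.1 (h ▸ List.mem_map_of_mem hq)
      have hstep : stepA ts (acc, seen) pt = (acc ++ [pt.1], PySem.Set.add seen pt.1) := by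
        simp only [stepA, hint, hc]
        simp
      rw [List.foldl_cons, hstep, ih (acc ++ [pt.1]) (PySem.Set.add seen pt.1) hnd.2 hrest]
      simp [hint]
    · have hrest : ∀ q ∈ rest, q.1 ∉ seen := fun q hq => hseen q (List.mem_cons_of_mem _ hq)
      rw [Bool.not_eq_true] at hint
      have hstep : stepA ts (acc, seen) pt = (acc, seen) := by
        simp only [stepA, hint]
        simp
      rw [List.foldl_cons, hstep, ih acc seen hnd.2 hrest]
      simp [hint]

-- the inverted dict hits phase pt.1 on exactly the triggers pt.2 of the phase map
lemma inverted_spec : ∀ pt ∈ phaseMapA, ∀ e : String,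
    invertedB.get? e = some pt.1 ↔ e ∈ pt.2 := by
  intro pt hpt e
  have hitems : invertedB.items =
      [("invalid_user", "Reconnaissance"), ("disconnect", "Reconnaissance"),
       ("failed_login", "Initial Access"), ("successful_login", "Initial Access"),
       ("suspicious_process", "Execution"), ("cron_exec", "Execution"),
       ("user_add", "Persistence"), ("user_modify", "Persistence"),
       ("cron_modified", "Persistence"), ("iam_modification", "Persistence"),
       ("sudo", "Privilege Escalation"), ("su", "Privilege Escalation"),
       ("service_stop", "Defense Evasion"), ("defense_evasion", "Defense Evasion"),
       ("data_modification", "Exfiltration"), ("data_access", "Exfiltration")] := by decide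
  have hnd : invertedB.keys.Nodup := by decide
  rw [PySem.Dict.get?_eq_some_iff_mem_items invertedB e pt.1 hnd, hitems]
  fin_cases hpt <;>
    simp [PySem.Set.ofList, PySem.Set.add, Prod.ext_iff]

-- A's per-phase condition coincides with B's membership in the 'found' set
lemma cond_eq (event_types : List String) : ∀ pt ∈ phaseMapA,
    (!(PySem.Set.inter pt.2 (PySem.Set.ofList event_types)).isEmpty) =
      PySem.Set.contains
        (PySem.Set.ofList (event_types.filterMap (fun e => invertedB.get? e))) pt.1 := by
  intro pt hpt
  rw [Bool.eq_iff_iff]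
  simp only [Bool.not_eq_true']
  rw [List.isEmpty_eq_false_iff_exists_mem]
  rw [PySem.Set.contains_iff]
  simp only [PySem.Set.mem_ofList, List.mem_filterMap, PySem.Set.mem_inter]
  constructor
  · rintro ⟨t, ht, hts⟩
    exact ⟨t, hts, (inverted_spec pt hpt t).mpr ht⟩
  · rintro ⟨e, he, hget⟩
    exact ⟨e, (inverted_spec pt hpt e).mp hget, he⟩

-- ===== VERDICT (by name: the statement is the Claim_ definition above) =====
theorem identify_phases_py_spec : Claim_equal_identify_phases_py := by
  intro event_types _
  unfold Spec_identify_phases_py identify_phases_py identify_phases_py_alt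
  rw [foldA_eq (PySem.Set.ofList event_types) phaseMapA [] PySem.Set.empty (by decide)
      (by intro pt _ h; exact absurd h (List.not_mem_nil))]
  have horder : orderB = phaseMapA.map Prod.fst := by decide
  rw [horder, List.nil_append, List.filter_map,
      List.filter_congr (fun pt hpt => cond_eq event_types pt hpt)]
  rfl
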